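-- pv_equiv track=rewrite | github.com/webro12138/IM | NDD_AGCNIM/utils/get_labels.py | classifiy_strong_node
-- ===== SOURCE A (Python) =====
-- import math
--
-- def classifiy_strong_node(degrees:dict):
--
--     degrees_sort = sorted(degrees.items(), key=lambda x:x[1])
--     frequent = {}
--     for key in degrees_sort:
--         frequent[key[1]] = frequent.setdefault(key[1], 0) + 1
--
--     cur_point = 0
--     values = list(frequent.values())
--     degrees_list = list(frequent.keys())
--     diff = []
--     for i in range(len(values) - 1):
--         diff.append(math.fabs(values[i + 1] - values[i]))
--         if(math.fabs(values[i + 1] - values[i]) <= 1):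
--             flag = True
--             for j in range(i, i + 3):
--                 if(j + 1 < len(values)):
--                     if(math.fabs(values[j + 1] - values[j]) > 1):
--                         flag = False
--
--             if(flag):
--                 cur_point = degrees_list[i]
--                 break
--     influntial_nodes = []
--     degrees = dict(degrees)
--     for i in degrees:
--         if(cur_point < degrees[i]):
--             influntial_nodes.append(i)
--
--     return influntial_nodes, cur_point
-- ===== SOURCE B (Python) =====
-- def _rle(vs):
--     # run-length encode a sorted list in one forward pass: [(value, multiplicity)]
--     if not vs:
--         return []
--     groups = []
--     cur, cnt = vs[0], 1
--     for v in vs[1:]: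
--         if v == cur:
--             cnt += 1
--         else:
--             groups.append((cur, cnt))
--             cur, cnt = v, 1
--     groups.append((cur, cnt))
--     return groups
--
--
-- def classifiy_strong_node(degrees: dict):
--     # No dict of frequencies: sort the degree values and run-length encode them,
--     # then a suffix DP of "streak lengths" of small adjacent-count differences
--     # replaces A's re-checked 3-wide window.
--     groups = _rle(sorted(degrees.values()))
--     ds = [d for d, _ in groups]
--     cnts = [c for _, c in groups]
--     m = len(cnts)
--     # run[k] = number of consecutive adjacent differences |cnts[k+1]-cnts[k]| <= 1 starting at k
--     run = [0] * m
--     for k in range(m - 2, -1, -1):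
--         if abs(cnts[k + 1] - cnts[k]) <= 1:
--             run[k] = run[k + 1] + 1
--     cur_point = 0
--     for i in range(m - 1):
--         if run[i] >= min(3, m - 1 - i):
--             cur_point = ds[i]
--             break
--     return [k for k, v in degrees.items() if v > cur_point], cur_point
-- ===== Notes on version B (the rewrite author's own statement) =====
-- stated objective: faster
-- what changed: B drops A's frequency dictionary and re-checked 3-wide window: it sorts the degree values, run-length encodes the sorted list into (degree,count) groups in one pass, computes a suffix DP of streak lengths of small adjacent-count differences, and picks the first group whose streak covers min(3, remaining) differences; the node filter is a single comprehension.
import Mathlib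
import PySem

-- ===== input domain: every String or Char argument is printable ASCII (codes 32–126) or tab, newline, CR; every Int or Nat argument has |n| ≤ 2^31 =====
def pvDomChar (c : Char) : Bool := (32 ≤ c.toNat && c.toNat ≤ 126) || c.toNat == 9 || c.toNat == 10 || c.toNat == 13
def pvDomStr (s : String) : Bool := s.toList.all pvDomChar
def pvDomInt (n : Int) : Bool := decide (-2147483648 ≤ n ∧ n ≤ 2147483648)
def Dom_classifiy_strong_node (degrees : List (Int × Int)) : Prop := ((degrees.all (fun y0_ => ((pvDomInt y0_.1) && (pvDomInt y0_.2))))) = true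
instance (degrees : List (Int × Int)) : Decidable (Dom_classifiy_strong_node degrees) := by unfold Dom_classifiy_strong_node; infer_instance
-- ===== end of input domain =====

-- B replaces A's frequency dictionary and re-checked 3-wide window by run-length encoding the
-- sorted degree values and a suffix DP of streak lengths; same return value.

-- ===== PORT A =====

-- inner 'for j in range(i, i+3)' flag loop of A ('math.fabs' on these ints is exact; |·| ≤ 1 is natAbs ≤ 1)
def pvFlagA (values : List Int) (i : Nat) : Bool :=
  (List.range' i 3).foldl (fun flag j =>
    if j + 1 < values.length then
      if 1 < (values.getD (j + 1) 0 - values.getD j 0).natAbs then false else flag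
    else flag) true

-- outer 'for i in range(len(values)-1): … break' loop of A, returning cur_point
-- (recursion over the list of loop indices range(len(values)-1); '0' = loop ended without break)
def pvScanA (values keys : List Int) : List Nat → Int
  | [] => 0
  | i :: rest =>
    if (values.getD (i + 1) 0 - values.getD i 0).natAbs ≤ 1 then
      if pvFlagA values i then keys.getD i 0
      else pvScanA values keys rest
    else pvScanA values keys rest

def classifiy_strong_node (degrees : List (Int × Int)) : List Int × Int :=
  let degrees_sort := PySem.List.sorted degrees (fun x => x.2) false
  let frequent := degrees_sort.foldl
    (fun d kv => d.insert kv.2 (d.getD kv.2 0 + 1)) PySem.Dict.empty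
  let values := frequent.values
  let degrees_list := frequent.keys
  let cur_point := pvScanA values degrees_list (List.range (values.length - 1))
  -- 'for i in degrees: if cur_point < degrees[i]: influntial_nodes.append(i)' over the dict
  let influntial_nodes := degrees.foldl
    (fun acc kv => if cur_point < kv.2 then acc ++ [kv.1] else acc) []
  (influntial_nodes, cur_point)

-- ===== PORT B =====

-- '_rle': the one-pass grouping loop of Source B carrying the current (value, count)
def pvRleGo (cur cnt : Int) : List Int → List (Int × Int)
  | [] => [(cur, cnt)]
  | v :: t => if v == cur then pvRleGo cur (cnt + 1) t else (cur, cnt) :: pvRleGo v 1 t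

def pvRle (vs : List Int) : List (Int × Int) :=
  match vs with
  | [] => []
  | v :: t => pvRleGo v 1 t

-- the backward 'for k in range(m-2, -1, -1)' DP of Source B, as the structural recursion computing
-- the same run list (run[k] = run[k+1] + 1 if |cnts[k+1]-cnts[k]| <= 1 else 0)
def pvRuns : List Int → List Int
  | [] => []
  | [_] => [0]
  | a :: b :: t =>
    (if (b - a).natAbs ≤ 1 then (pvRuns (b :: t)).getD 0 0 + 1 else 0) :: pvRuns (b :: t)

-- 'for i in range(m-1): if run[i] >= min(3, m-1-i): … break' loop of Source B
-- (recursion over the list of loop indices range(m-1); '0' = loop ended without break)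
def pvScanC (run ds : List Int) : List Nat → Int
  | [] => 0
  | i :: rest =>
    if min 3 ((ds.length : Int) - 1 - i) ≤ run.getD i 0 then ds.getD i 0
    else pvScanC run ds rest

def classifiy_strong_node_alt (degrees : List (Int × Int)) : List Int × Int :=
  let groups := pvRle (PySem.List.sorted (degrees.map (fun kv => kv.2)) (fun x => x) false)
  let ds := groups.map (fun g => g.1)
  let cnts := groups.map (fun g => g.2)
  let run := pvRuns cnts
  let cur_point := pvScanC run ds (List.range (ds.length - 1))
  ((degrees.filter (fun kv => decide (cur_point < kv.2))).map (fun kv => kv.1), cur_point)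

-- ===== PRECONDITION & SPEC =====
def Spec_classifiy_strong_node (degrees : List (Int × Int)) (out : List Int × Int) : Prop := out = classifiy_strong_node_alt degrees
instance (degrees : List (Int × Int)) (out : List Int × Int) : Decidable (Spec_classifiy_strong_node degrees out) := by unfold Spec_classifiy_strong_node; infer_instance

-- ===== CLAIM (what is proved, stated in full; the proofs are below) =====
def Claim_equal_classifiy_strong_node : Prop := ∀ (degrees : List (Int × Int)), Dom_classifiy_strong_node degrees → Spec_classifiy_strong_node degrees (classifiy_strong_node degrees)

-- ===== LEMMAS AND PROOFS =====

-- proof-only helper: streak of consecutive small adjacent differences starting at index i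
def pvSk (v : List Int) (i : Nat) : Int :=
  if i + 1 < v.length ∧ (v.getD (i + 1) 0 - v.getD i 0).natAbs ≤ 1 then pvSk v (i + 1) + 1 else 0
termination_by v.length - i
decreasing_by omega

theorem pvSk_nonneg (v : List Int) (i : Nat) : 0 ≤ pvSk v i := by
  rw [pvSk]
  split
  · have := pvSk_nonneg v (i + 1); omega
  · omega
termination_by v.length - i
decreasing_by omega

theorem pvSk_shift (x : Int) (w : List Int) (i : Nat) : pvSk (x :: w) (i + 1) = pvSk w i := by
  conv_lhs => rw [pvSk]
  conv_rhs => rw [pvSk]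
  simp only [List.getD_cons_succ, List.length_cons]
  by_cases h : i + 1 < w.length ∧ (w.getD (i + 1) 0 - w.getD i 0).natAbs ≤ 1
  · rw [if_pos (⟨by omega, h.2⟩ : i + 1 + 1 < w.length + 1 ∧ _), if_pos h,
      pvSk_shift x w (i + 1)]
  · rw [if_neg (fun hc => h ⟨by omega, hc.2⟩), if_neg h]
termination_by w.length - i
decreasing_by omega

theorem pvRuns_getD (v : List Int) : ∀ i, (pvRuns v).getD i 0 = pvSk v i := by
  induction v with
  | nil => intro i; rw [pvSk]; simp [pvRuns]
  | cons a t ih =>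
    intro i
    cases t with
    | nil =>
      rw [pvSk]
      cases i <;> simp [pvRuns]
    | cons b t' =>
      cases i with
      | zero =>
        conv_rhs => rw [pvSk]
        have h1 : (0 : Nat) + 1 < (a :: b :: t').length := by simp
        simp only [pvRuns, List.getD_cons_zero, List.getD_cons_succ, h1, true_and]
        rw [ih 0, ← pvSk_shift a (b :: t') 0]
      | succ j =>
        simp only [pvRuns, List.getD_cons_succ]
        rw [ih j, pvSk_shift]

theorem pv_window (v : List Int) : ∀ (w i : Nat), i + w + 1 ≤ v.length →
    ((w : Int) ≤ pvSk v i ↔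
      ∀ j, i ≤ j → j < i + w → (v.getD (j + 1) 0 - v.getD j 0).natAbs ≤ 1) := by
  intro w
  induction w with
  | zero =>
    intro i _
    constructor
    · intro _ j h1 h2; omega
    · intro _; exact pvSk_nonneg v i
  | succ k ih =>
    intro i hlen
    rw [pvSk]
    have hi1 : i + 1 < v.length := by omega
    by_cases hok : (v.getD (i + 1) 0 - v.getD i 0).natAbs ≤ 1
    · rw [if_pos ⟨hi1, hok⟩]
      have := ih (i + 1) (by omega)
      constructor
      · intro hle j hj1 hj2
        by_cases hji : j = i
        · subst hji; exact hok
        · exact (this.mp (by push_cast at hle ⊢; omega)) j (by omega) (by omega)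
      · intro hall
        have hk : (k : Int) ≤ pvSk v (i + 1) :=
          this.mpr (fun j hj1 hj2 => hall j (by omega) (by omega))
        push_cast
        omega
    · rw [if_neg (by tauto)]
      constructor
      · intro hle; exfalso; push_cast at hle; omega
      · intro hall; exact absurd (hall i (le_refl i) (by omega)) hok

-- A's flag loop is 'no big jump among the (in-range) diffs at i, i+1, i+2'
theorem pv_flagA_eq (v : List Int) (i : Nat) :
    pvFlagA v i = !((List.range' i 3).any fun j =>
      decide (j + 1 < v.length) && decide (1 < (v.getD (j + 1) 0 - v.getD j 0).natAbs)) := by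
  unfold pvFlagA
  rw [PySem.List.foldl_congr_mem (g := fun flag j =>
      if (decide (j + 1 < v.length) && decide (1 < (v.getD (j + 1) 0 - v.getD j 0).natAbs)) then false else flag)]
  · rw [PySem.List.foldl_if_false_eq]; simp
  · intro acc x _
    by_cases h1 : x + 1 < v.length <;> by_cases h2 : 1 < (v.getD (x + 1) 0 - v.getD x 0).natAbs <;>
      simp only [h1, h2, decide_true, decide_false, Bool.true_and, Bool.false_and,
        if_true, if_false] <;> simp

-- A's break condition at i = B's 'run[i] >= min(3, m-1-i)'
theorem pv_condA_iff (v : List Int) (i : Nat) (h : i < v.length - 1) :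
    ((v.getD (i + 1) 0 - v.getD i 0).natAbs ≤ 1 ∧ pvFlagA v i = true) ↔
      min 3 ((v.length : Int) - 1 - i) ≤ pvSk v i := by
  have hlen : i + 1 < v.length := by omega
  have hflag : (pvFlagA v i = true) ↔ ∀ j, i ≤ j → j < i + 3 → j + 1 < v.length →
      (v.getD (j + 1) 0 - v.getD j 0).natAbs ≤ 1 := by
    rw [pv_flagA_eq, Bool.not_eq_true']
    simp only [List.any_eq_false, List.mem_range'_1, Bool.and_eq_true, decide_eq_true_eq,
      not_and, not_lt]
    constructor
    · intro hf j h1 h2 h3; have := hf j ⟨h1, by omega⟩ h3; omega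
    · intro hf j hj h3; have := hf j hj.1 (by omega) h3; omega
  set w : Nat := min 3 (v.length - 1 - i) with hw
  have hcast : min (3 : Int) ((v.length : Int) - 1 - i) = (w : Nat) := by
    simp only [hw]; push_cast; omega
  rw [hcast, pv_window v w i (by omega), hflag]
  constructor
  · rintro ⟨h0, hf⟩ j hj1 hj2
    by_cases hji : j = i
    · subst hji; exact h0
    · exact hf j hj1 (by omega) (by omega)
  · intro hall
    exact ⟨hall i le_rfl (by omega), fun j h1 h2 h3 => hall j h1 (by omega)⟩

-- the two threshold loops agree on any list of in-range loop indices
theorem pv_scan_eq (v k : List Int) (hk : k.length = v.length) :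
    ∀ (idxs : List Nat), (∀ j ∈ idxs, j < v.length - 1) →
      pvScanA v k idxs = pvScanC (pvRuns v) k idxs := by
  intro idxs
  induction idxs with
  | nil => intro _; rfl
  | cons i rest ih =>
    intro hall
    have h : i < v.length - 1 := hall i List.mem_cons_self
    have hcond := pv_condA_iff v i h
    have hrest := ih (fun j hj => hall j (List.mem_cons_of_mem _ hj))
    simp only [pvScanA, pvScanC]
    rw [hk, pvRuns_getD]
    by_cases h1 : (v.getD (i + 1) 0 - v.getD i 0).natAbs ≤ 1 <;>
      by_cases h2 : pvFlagA v i = true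
    · rw [if_pos h1, if_pos h2, if_pos (hcond.mp ⟨h1, h2⟩)]
    · rw [if_pos h1, if_neg h2, if_neg (fun hc => h2 (hcond.mpr hc).2), hrest]
    · rw [if_neg h1, if_neg (fun hc => h1 (hcond.mpr hc).1), hrest]
    · rw [if_neg h1, if_neg (fun hc => h1 (hcond.mpr hc).1), hrest]

-- one grouping step of pvRleGo consumes exactly the leading block of equal values
theorem pvRleGo_eq (t : List Int) : ∀ (cur cnt : Int),
    pvRleGo cur cnt t
      = (cur, cnt + ((t.takeWhile (fun x => x == cur)).length : Int))
        :: pvRle (t.dropWhile (fun x => x == cur)) := by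
  induction t with
  | nil => intro cur cnt; simp [pvRleGo, pvRle]
  | cons v t ih =>
    intro cur cnt
    by_cases hv : v = cur
    · subst hv
      simp only [pvRleGo, beq_self_eq_true, if_true, List.takeWhile_cons,
        List.dropWhile_cons]
      rw [ih v (cnt + 1)]
      have : cnt + 1 + ((t.takeWhile (fun x => x == v)).length : Int)
          = cnt + (((v :: t.takeWhile (fun x => x == v)).length : Nat) : Int) := by
        simp only [List.length_cons]; push_cast; ring
      rw [this]
    · have hb : (v == cur) = false := beq_eq_false_iff_ne.mpr hv
      simp only [pvRleGo, hb, Bool.false_eq_true, if_false, List.takeWhile_cons, List.dropWhile_cons]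
      rw [show pvRleGo v 1 t = pvRle (v :: t) from rfl]
      simp

-- PySem.Set.ofList keeps a subsequence (the first occurrences) of its argument
theorem pv_ofList_sublist {α : Type} [BEq α] [LawfulBEq α] (xs : List α) :
    (PySem.Set.ofList xs).Sublist xs := by
  induction xs with
  | nil => simp [PySem.Set.ofList_nil]
  | cons x t ih =>
    rw [PySem.Set.ofList_cons]
    refine List.Sublist.cons₂ x ?_
    have h : (PySem.Set.discard (PySem.Set.ofList t) x).Sublist (PySem.Set.ofList t) := by
      simp [PySem.Set.discard]
    exact h.trans ih

-- the first occurrences of a ≤-sorted Int list are <-sorted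
theorem pv_ofList_pairwise_lt (s : List Int) (hs : s.Pairwise (· ≤ ·)) :
    (PySem.Set.ofList s).Pairwise (· < ·) := by
  have h1 := hs.sublist (pv_ofList_sublist s)
  have h2 : (PySem.Set.ofList s).Pairwise (· ≠ ·) := PySem.Set.nodup_ofList s
  exact (h1.and h2).imp (fun h => lt_of_le_of_ne h.1 h.2)

-- sorted distinct values of l = first occurrences of a sorted copy s of l
theorem pv_sorted_ofList (l s : List Int) (hperm : s.Perm l) (hs : s.Pairwise (· ≤ ·)) :
    PySem.List.sorted (PySem.Set.ofList l) (fun x => x) false = PySem.Set.ofList s := by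
  apply PySem.List.sorted_eq_of_perm_of_pairwise_lt
  · refine (List.perm_ext_iff_of_nodup (PySem.Set.nodup_ofList s) (PySem.Set.nodup_ofList l)).mpr ?_
    intro a
    simp [PySem.Set.mem_ofList, hperm.mem_iff]
  · exact pv_ofList_pairwise_lt s hs

theorem pv_discard_of_not_mem (s : List Int) (v : Int) (h : v ∉ s) :
    PySem.Set.discard s v = s :=
  List.filter_eq_self.mpr (fun x hx => by
    have hne : (x == v) = false := beq_eq_false_iff_ne.mpr (fun hxv => h (hxv ▸ hx))
    simp [hne])

theorem pv_discard_cons_self (s : List Int) (v : Int) :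
    PySem.Set.discard (v :: s) v = PySem.Set.discard s v := by
  show List.filter _ (v :: s) = _
  rw [List.filter_cons, if_neg (by simp)]
  rfl

theorem pv_discard_idem (s : List Int) (v : Int) :
    PySem.Set.discard (PySem.Set.discard s v) v = PySem.Set.discard s v := by
  show List.filter _ (List.filter _ s) = _
  rw [List.filter_filter]
  simp only [Bool.and_self]
  rfl

-- run-length encoding of a ≤-sorted list is its distinct values with their multiplicities
theorem pv_rle_sorted (s : List Int) (hs : s.Pairwise (· ≤ ·)) :
    pvRle s = (PySem.Set.ofList s).map (fun d => (d, (s.count d : Int))) := by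
  match s with
  | [] => simp [pvRle, PySem.Set.ofList_nil]
  | v :: t =>
    have hvt : ∀ x ∈ t, v ≤ x := fun x hx => (List.pairwise_cons.mp hs).1 x hx
    have ht : t.Pairwise (· ≤ ·) := (List.pairwise_cons.mp hs).2
    set a := t.takeWhile (fun x => x == v) with ha
    set r := t.dropWhile (fun x => x == v) with hr
    have htar : a ++ r = t := List.takeWhile_append_dropWhile
    have hav : ∀ x ∈ a, x = v := fun x hx => by
      have := List.mem_takeWhile_imp hx
      simpa using this
    have hrsub : r.Sublist t := List.dropWhile_sublist _
    have hrlt : ∀ x ∈ r, v < x := by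
      intro x hx
      have hp : r.Pairwise (· ≤ ·) := ht.sublist hrsub
      rcases hc : r with _ | ⟨h0, r'⟩
      · rw [hc] at hx; simp at hx
      · have hdw : t.dropWhile (fun x => x == v) = h0 :: r' := by rw [← hr, hc]
        have hne : t.dropWhile (fun x => x == v) ≠ [] := by rw [hdw]; simp
        have hhf := List.head_dropWhile_not (fun x => x == v) hne
        have hh0 : h0 ≠ v := by
          simp only [hdw, List.head_cons] at hhf
          simpa using hhf
        have hh0t : h0 ∈ t := hrsub.subset (by rw [hc]; exact List.mem_cons_self)
        have hvh0 : v < h0 := lt_of_le_of_ne (hvt h0 hh0t) (Ne.symm hh0)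
        rw [hc] at hx
        rcases List.mem_cons.mp hx with hx0 | hx'
        · exact hx0 ▸ hvh0
        · rw [hc] at hp
          exact lt_of_lt_of_le hvh0 ((List.pairwise_cons.mp hp).1 x hx')
    have hvr : v ∉ r := fun hv => lt_irrefl v (hrlt v hv)
    have hr_pair : r.Pairwise (· ≤ ·) := ht.sublist hrsub
    -- ofList (v :: t) = v :: ofList r
    have hdiscard : ∀ (a' : List Int), (∀ x ∈ a', x = v) →
        PySem.Set.discard (PySem.Set.ofList (a' ++ r)) v = PySem.Set.ofList r := by
      intro a'
      induction a' with
      | nil =>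
        intro _
        simp only [List.nil_append]
        exact pv_discard_of_not_mem _ v (fun h => hvr ((PySem.Set.mem_ofList _ _).mp h))
      | cons x a'' ih =>
        intro hall
        have hx : x = v := hall x List.mem_cons_self
        rw [hx, List.cons_append, PySem.Set.ofList_cons, pv_discard_cons_self,
          pv_discard_idem]
        exact ih (fun y hy => hall y (List.mem_cons_of_mem _ hy))
    have hofl : PySem.Set.ofList (v :: t) = v :: PySem.Set.ofList r := by
      rw [PySem.Set.ofList_cons, ← htar, hdiscard a hav]
    -- counts
    have hcount_a : a.count v = a.length := by
      rw [List.count_eq_length]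
      intro y hy; exact ((hav y hy) ▸ rfl)
    have hcount_v : (v :: t).count v = 1 + a.length := by
      rw [← htar, List.count_cons_self, List.count_append, hcount_a,
        List.count_eq_zero.mpr hvr]
      omega
    have hcount_d : ∀ d ∈ PySem.Set.ofList r, (v :: t).count d = r.count d := by
      intro d hd
      have hdr : d ∈ r := (PySem.Set.mem_ofList _ _).mp hd
      have hdv : d ≠ v := fun h => lt_irrefl v (h ▸ hrlt d hdr)
      rw [← htar, List.count_cons_of_ne (Ne.symm hdv), List.count_append,
        List.count_eq_zero.mpr (fun hda => hdv (hav d hda))]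
      omega
    rw [pvRle, pvRleGo_eq t v 1, hofl]
    simp only [List.map_cons]
    congr 1
    · rw [← ha, hcount_v]; push_cast; ring_nf
    · rw [← hr, pv_rle_sorted r hr_pair]
      exact (List.map_congr_left (fun d hd => by rw [hcount_d d hd])).symm
termination_by s.length
decreasing_by
  rw [← hr]; exact Nat.lt_succ_of_le (List.Sublist.length_le (List.dropWhile_sublist _))

-- ===== VERDICT (by name: the statement is the Claim_ definition above) =====
theorem classifiy_strong_node_spec : Claim_equal_classifiy_strong_node := by
  intro degrees _
  unfold Spec_classifiy_strong_node classifiy_strong_node classifiy_strong_node_alt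
  set l := degrees.map (fun kv => kv.2) with hldef
  -- the two sorted copies of the degree values
  have hpermA : ((PySem.List.sorted degrees (fun x => x.2) false).map (fun kv => kv.2)).Perm l :=
    (PySem.List.sorted_perm degrees (fun x => x.2) false).map _
  have hsA : ((PySem.List.sorted degrees (fun x => x.2) false).map (fun kv => kv.2)).Pairwise (· ≤ ·) :=
    PySem.List.sorted_map_key_pairwise degrees (fun x => x.2)
  set sA := (PySem.List.sorted degrees (fun x => x.2) false).map (fun kv => kv.2) with hsAdef
  have hpermB : (PySem.List.sorted l (fun x => x) false).Perm l := PySem.List.sorted_perm l _ false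
  have hsB : (PySem.List.sorted l (fun x => x) false).Pairwise (· ≤ ·) := by
    simpa using PySem.List.sorted_pairwise (xs := l) (key := fun x => x)
  set sB := PySem.List.sorted l (fun x => x) false with hsBdef
  -- both dedups are THE sorted distinct list
  have hD : PySem.Set.ofList sA = PySem.Set.ofList sB := by
    rw [← pv_sorted_ofList l sA hpermA hsA, ← pv_sorted_ofList l sB hpermB hsB]
  -- A's dict is the counter of sA
  have hfreq : (PySem.List.sorted degrees (fun x => x.2) false).foldl
      (fun d kv => d.insert kv.2 (d.getD kv.2 0 + 1)) PySem.Dict.empty = PySem.Dict.counter sA := by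
    rw [hsAdef, ← PySem.Dict.foldl_insert_getD_add_one_eq_counter, List.foldl_map]
  have hkeysA : (PySem.Dict.counter sA).keys = PySem.Set.ofList sA := PySem.Dict.keys_counter sA
  have hvalsA : (PySem.Dict.counter sA).values
      = (PySem.Set.ofList sA).map (fun d => ((l.count d : Int))) := by
    simp only [PySem.Dict.values, PySem.Dict.items_counter, List.map_map]
    refine List.map_congr_left ?_
    intro x _
    simp only [Function.comp]
    exact_mod_cast (hpermA.count_eq x)
  -- B's groups are the same distinct values with the same multiplicities
  have hgroups : pvRle sB = (PySem.Set.ofList sA).map (fun d => (d, (l.count d : Int))) := by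
    rw [pv_rle_sorted sB hsB, hD]
    refine List.map_congr_left ?_
    intro x _
    rw [hpermB.count_eq x]
  have hds : (pvRle sB).map (fun g => g.1) = PySem.Set.ofList sA := by
    rw [hgroups, List.map_map]
    exact List.map_congr_left (fun x _ => rfl) |>.trans (List.map_id _)
  have hcnts : (pvRle sB).map (fun g => g.2)
      = (PySem.Set.ofList sA).map (fun d => ((l.count d : Int))) := by
    rw [hgroups, List.map_map]; rfl
  have hlen : ((PySem.Set.ofList sA) : List Int).length
      = ((PySem.Set.ofList sA).map (fun d => ((l.count d : Int)))).length := by simp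
  have hscan : pvScanA ((PySem.Set.ofList sA).map (fun d => ((l.count d : Int))))
        (PySem.Set.ofList sA)
        (List.range ((((PySem.Set.ofList sA).map (fun d => ((l.count d : Int)))).length) - 1))
      = pvScanC (pvRuns ((PySem.Set.ofList sA).map (fun d => ((l.count d : Int)))))
        (PySem.Set.ofList sA)
        (List.range (((PySem.Set.ofList sA) : List Int).length - 1)) := by
    rw [show ((PySem.Set.ofList sA) : List Int).length
        = ((PySem.Set.ofList sA).map (fun d => ((l.count d : Int)))).length from hlen]
    exact pv_scan_eq _ _ hlen _ (fun j hj => by simpa using List.mem_range.mp hj)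
  simp only [hfreq, hkeysA, hvalsA, hds, hcnts, hscan]
  rw [PySem.List.foldl_append_ite (p := fun kv : Int × Int =>
    pvScanC (pvRuns ((PySem.Set.ofList sA).map (fun d => ((l.count d : Int)))))
      (PySem.Set.ofList sA) (List.range (((PySem.Set.ofList sA) : List Int).length - 1)) < kv.2)
    (f := fun kv : Int × Int => kv.1)]
  simp
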